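-- pv_equiv track=rewrite | github.com/IamGauravS/Data-Structures-And-Algorithms | recursion-and-backtracking/11-n-queens.py | check_if_queen_attacking
-- ===== SOURCE A (Python) =====
-- def check_if_queen_attacking(board, i, j):
--     n = len(board)
--
--     # Check the column
--     for row in range(i):
--         if board[row][j] == 'Q':
--             return True
--
--     # Check upper left diagonal
--     row, col = i - 1, j - 1
--     while row >= 0 and col >= 0:
--         if board[row][col] == 'Q':
--             return True
--         row -= 1
--         col -= 1
--
--     # Check upper right diagonal
--     row, col = i - 1, j + 1
--     while row >= 0 and col < n:
--         if board[row][col] == 'Q':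
--             return True
--         row -= 1
--         col += 1
--
--     return False
-- ===== SOURCE B (Python) =====
-- def check_if_queen_attacking(board, i, j):
--     n = len(board)
--     for row in range(i):
--         d = i - row
--         for col in (j, j - d, j + d):
--             if 0 <= col < n and board[row][col] == 'Q':
--                 return True
--     return False
-- ===== Notes on version B (the rewrite author's own statement) =====
-- stated objective: alternative
-- what changed: Replaces A's three separate directional walks (column for-loop plus two diagonal while-loops with their own row/col cursors) by a single row-indexed pass that computes the diagonal offsets arithmetically (d = i - row) and checks the three candidate columns j, j-d, j+d with uniform bounds guards.
-- outside the precondition, e.g. on check_if_queen_attacking([['.', 'Q'], ['.', '.']], 1, -1): A returns True, B returns False; on check_if_queen_attacking([['.', '.', 'Q'], ['x', 'y', 'z']], 1, 2): A returns True, B returns False; on check_if_queen_attacking([['Q'], ['x', 'y']], 1, 0): A returns True, B returns True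
import Mathlib
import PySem

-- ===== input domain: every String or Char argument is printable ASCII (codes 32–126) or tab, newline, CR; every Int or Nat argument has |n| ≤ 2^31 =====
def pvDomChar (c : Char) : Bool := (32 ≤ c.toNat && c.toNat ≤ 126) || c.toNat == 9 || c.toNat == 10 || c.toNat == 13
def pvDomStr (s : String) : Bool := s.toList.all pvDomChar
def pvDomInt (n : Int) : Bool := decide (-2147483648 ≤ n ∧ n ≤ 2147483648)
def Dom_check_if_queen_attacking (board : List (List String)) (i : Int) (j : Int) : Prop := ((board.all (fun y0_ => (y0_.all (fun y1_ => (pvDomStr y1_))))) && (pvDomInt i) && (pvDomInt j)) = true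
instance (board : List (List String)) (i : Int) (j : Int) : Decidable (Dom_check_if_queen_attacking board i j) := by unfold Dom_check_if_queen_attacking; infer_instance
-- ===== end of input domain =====

-- B replaces A's three directional walks (column loop + two diagonal while-loops) by one
-- row-indexed pass checking the candidate columns j, j-d, j+d (d = i - row): an alternative
-- decomposition of the same O(i) scan.


-- ===== PORT A =====
-- shared cell accessor: board[r][c] with Python indexing (negative wrap); the default "" (never
-- 'Q') is only reached outside Pre_, where Python raises IndexError
def pvCell (board : List (List String)) (r c : Int) : Bool :=
  PySem.List.pyGetD (PySem.List.pyGetD board r []) c "" == "Q"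

-- A's 'while row >= 0 and col >= 0' upper-left diagonal walk
def pvDiagL (board : List (List String)) (row col : Int) : Bool :=
  if h : 0 ≤ row ∧ 0 ≤ col then
    if pvCell board row col then true else pvDiagL board (row - 1) (col - 1)
  else false
termination_by (row + 1).toNat
decreasing_by omega

-- A's 'while row >= 0 and col < n' upper-right diagonal walk
def pvDiagR (board : List (List String)) (row col n : Int) : Bool :=
  if h : 0 ≤ row ∧ col < n then
    if pvCell board row col then true else pvDiagR board (row - 1) (col + 1) n
  else false
termination_by (row + 1).toNat
decreasing_by omega

def check_if_queen_attacking (board : List (List String)) (i : Int) (j : Int) : Bool :=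
  let n : Int := board.length
  if (PySem.List.pyRange 0 i 1).any (fun row => pvCell board row j) then true
  else if pvDiagL board (i - 1) (j - 1) then true
  else pvDiagR board (i - 1) (j + 1) n

-- ===== PORT B =====
def check_if_queen_attacking_alt (board : List (List String)) (i : Int) (j : Int) : Bool :=
  let n : Int := board.length
  (PySem.List.pyRange 0 i 1).any (fun row =>
    let d := i - row
    [j, j - d, j + d].any (fun col =>
      decide (0 ≤ col) && decide (col < n) && pvCell board row col))

-- ===== PRECONDITION & SPEC =====
-- Pre_ excludes inputs where A raises IndexError and inputs (negative j, or rows whose length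
-- differs from n) where A's unguarded column indexing reads cells by negative-index wraparound
-- or beyond column n-1; when i ≤ 0 nothing is read, so all such inputs are admitted.
def Pre_check_if_queen_attacking (board : List (List String)) (i : Int) (j : Int) : Prop :=
  i ≤ 0 ∨ (0 ≤ j ∧ j < (board.length : Int) ∧ i ≤ (board.length : Int) ∧
           ∀ r ∈ board, r.length = board.length)
instance (board : List (List String)) (i : Int) (j : Int) : Decidable (Pre_check_if_queen_attacking board i j) := by unfold Pre_check_if_queen_attacking; infer_instance

def pvWitness_check_if_queen_attacking : List (List String) × Int × Int :=
  ([[".", "."], ["Q", "."]], 1, 1)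

def Spec_check_if_queen_attacking (board : List (List String)) (i : Int) (j : Int) (out : Bool) : Prop := out = check_if_queen_attacking_alt board i j
instance (board : List (List String)) (i : Int) (j : Int) (out : Bool) : Decidable (Spec_check_if_queen_attacking board i j out) := by unfold Spec_check_if_queen_attacking; infer_instance

-- ===== CLAIM (what is proved, stated in full; the proofs are below) =====
def Claim_equal_check_if_queen_attacking : Prop := ∀ (board : List (List String)) (i : Int) (j : Int), Dom_check_if_queen_attacking board i j → Pre_check_if_queen_attacking board i j → Spec_check_if_queen_attacking board i j (check_if_queen_attacking board i j)

-- ===== LEMMAS AND PROOFS =====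

-- A's upper-left walk finds a queen iff some diagonal offset k hits one within bounds
theorem pvDiagL_iff (board : List (List String)) (row col : Int) :
    pvDiagL board row col = true ↔
      ∃ k : ℕ, (k : Int) ≤ row ∧ (k : Int) ≤ col ∧ pvCell board (row - k) (col - k) = true := by
  induction row, col using pvDiagL.induct board with
  | case1 row col h hc =>
    rw [pvDiagL, dif_pos h, if_pos hc]
    exact iff_of_true rfl ⟨0, by omega, by omega, by simpa using hc⟩
  | case2 row col h hc ih =>
    rw [pvDiagL, dif_pos h, if_neg (by simp [hc]), ih]
    constructor
    · rintro ⟨k, h1, h2, h3⟩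
      refine ⟨k + 1, by push_cast; omega, by push_cast; omega, ?_⟩
      convert h3 using 2 <;> push_cast <;> ring
    · rintro ⟨k, h1, h2, h3⟩
      match k with
      | 0 => simp only [Nat.cast_zero, sub_zero] at h3; exact absurd h3 (by simp [hc])
      | k + 1 =>
        refine ⟨k, by push_cast at h1 ⊢; omega, by push_cast at h2 ⊢; omega, ?_⟩
        convert h3 using 2 <;> push_cast <;> ring
  | case3 row col h =>
    rw [pvDiagL, dif_neg h]
    refine iff_of_false (by simp) ?_
    rintro ⟨k, h1, h2, _⟩
    exact h ⟨by omega, by omega⟩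

-- A's upper-right walk, same characterisation
theorem pvDiagR_iff (board : List (List String)) (row col n : Int) :
    pvDiagR board row col n = true ↔
      ∃ k : ℕ, (k : Int) ≤ row ∧ col + k < n ∧ pvCell board (row - k) (col + k) = true := by
  induction row, col using pvDiagR.induct board n with
  | case1 row col h hc =>
    rw [pvDiagR, dif_pos h, if_pos hc]
    exact iff_of_true rfl ⟨0, by omega, by simpa using h.2, by simpa using hc⟩
  | case2 row col h hc ih =>
    rw [pvDiagR, dif_pos h, if_neg (by simp [hc]), ih]
    constructor
    · rintro ⟨k, h1, h2, h3⟩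
      refine ⟨k + 1, by push_cast; omega, by push_cast at h2 ⊢; omega, ?_⟩
      convert h3 using 2 <;> push_cast <;> ring
    · rintro ⟨k, h1, h2, h3⟩
      match k with
      | 0 => simp only [Nat.cast_zero, sub_zero, add_zero] at h3; exact absurd h3 (by simp [hc])
      | k + 1 =>
        refine ⟨k, by push_cast at h1 ⊢; omega, by push_cast at h2 ⊢; omega, ?_⟩
        convert h3 using 2 <;> push_cast <;> ring
  | case3 row col h =>
    rw [pvDiagR, dif_neg h]
    refine iff_of_false (by simp) ?_
    rintro ⟨k, h1, h2, _⟩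
    exact h ⟨by omega, by omega⟩

-- any over a pointwise disjunction splits
theorem pvAnyOr {α : Type} (l : List α) (f g : α → Bool) :
    (l.any fun x => f x || g x) = (l.any f || l.any g) := by
  induction l with
  | nil => simp
  | cons x xs ih =>
    simp only [List.any_cons, ih]
    cases f x <;> cases g x <;> simp

theorem check_if_queen_attacking_spec : Claim_equal_check_if_queen_attacking := by
  intro board i j _ hpre
  unfold Spec_check_if_queen_attacking check_if_queen_attacking check_if_queen_attacking_alt
  by_cases hi : i ≤ 0
  · rw [PySem.List.pyRange_one_eq_nil (by omega : i ≤ 0)]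
    simp only [List.any_nil, Bool.false_eq_true, if_false]
    rw [pvDiagL, dif_neg (by omega), pvDiagR, dif_neg (by omega)]
    simp
  · push Not at hi
    rcases hpre with hle | ⟨hj0, hjn, hin, _⟩
    · omega
    -- reduce B's inner 3-element any
    have hB : (PySem.List.pyRange 0 i 1).any (fun row =>
        let d := i - row
        [j, j - d, j + d].any (fun col =>
          decide (0 ≤ col) && decide (col < (board.length : Int)) && pvCell board row col)) =
        ((PySem.List.pyRange 0 i 1).any (fun row => pvCell board row j) ||
         pvDiagL board (i - 1) (j - 1) ||
         pvDiagR board (i - 1) (j + 1) (board.length : Int)) := by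
      have hsplit : ∀ row : Int,
          (let d := i - row
           [j, j - d, j + d].any (fun col =>
             decide (0 ≤ col) && decide (col < (board.length : Int)) && pvCell board row col)) =
          ((decide (0 ≤ j) && decide (j < (board.length : Int)) && pvCell board row j) ||
           ((decide (0 ≤ j - (i - row)) && decide (j - (i - row) < (board.length : Int)) &&
             pvCell board row (j - (i - row))) ||
            (decide (0 ≤ j + (i - row)) && decide (j + (i - row) < (board.length : Int)) &&
             pvCell board row (j + (i - row))))) := by
        intro row; simp
      rw [PySem.List.any_congr_mem (fun row _ => hsplit row), pvAnyOr, pvAnyOr, ← Bool.or_assoc]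
      congr 1
      congr 1
      · -- column part: the guards are true on Pre_
        refine PySem.List.any_congr_mem (fun row _ => ?_)
        simp [hj0, hjn]
      · -- upper-left part
        rw [Bool.eq_iff_iff, List.any_eq_true, pvDiagL_iff]
        constructor
        · rintro ⟨row, hmem, hrow⟩
          rw [PySem.List.mem_pyRange_one] at hmem
          simp only [Bool.and_eq_true, decide_eq_true_eq] at hrow
          obtain ⟨⟨hc0, _⟩, hcell⟩ := hrow
          refine ⟨(i - 1 - row).toNat, by omega, by omega, ?_⟩
          convert hcell using 2 <;> omega
        · rintro ⟨k, h1, h2, h3⟩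
          refine ⟨i - 1 - k, by rw [PySem.List.mem_pyRange_one]; omega, ?_⟩
          simp only [Bool.and_eq_true, decide_eq_true_eq]
          exact ⟨⟨by omega, by omega⟩, by convert h3 using 2 <;> omega⟩
      · -- upper-right part
        rw [Bool.eq_iff_iff, List.any_eq_true, pvDiagR_iff]
        constructor
        · rintro ⟨row, hmem, hrow⟩
          rw [PySem.List.mem_pyRange_one] at hmem
          simp only [Bool.and_eq_true, decide_eq_true_eq] at hrow
          obtain ⟨⟨_, hcn⟩, hcell⟩ := hrow
          refine ⟨(i - 1 - row).toNat, by omega, by omega, ?_⟩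
          convert hcell using 2 <;> omega
        · rintro ⟨k, h1, h2, h3⟩
          refine ⟨i - 1 - k, by rw [PySem.List.mem_pyRange_one]; omega, ?_⟩
          simp only [Bool.and_eq_true, decide_eq_true_eq]
          exact ⟨⟨by omega, by omega⟩, by convert h3 using 2 <;> omega⟩
    rw [hB]
    cases hA : (PySem.List.pyRange 0 i 1).any (fun row => pvCell board row j) <;>
      cases hL : pvDiagL board (i - 1) (j - 1) <;> simp
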